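-- pv_equiv track=rewrite | github.com/pegasis470/gradientSquad-BeyondClinics | doctor/views.py | extract_medication_info
-- ===== SOURCE A (Python) =====
-- def extract_medication_info(input_text):
--     medications = []
--     start_delimiter = "$$$"
--     end_delimiter = "~~~"
--
--     start_index = input_text.find(start_delimiter)
--     while start_index != -1:
--         end_index = input_text.find(end_delimiter, start_index)
--         if end_index != -1:
--             medication_info = input_text[start_index + len(start_delimiter):end_index].strip()
--             medications.append(medication_info)
--             start_index = input_text.find(start_delimiter, end_index)
--         else:
--             break
--
--     return medications
-- ===== SOURCE B (Python) =====
-- def extract_medication_info(input_text):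
--     medications = []
--     rest = input_text
--     while True:
--         _pre, sep, rest = rest.partition("$$$")
--         if not sep:
--             break
--         med, sep, rest = rest.partition("~~~")
--         if not sep:
--             break
--         medications.append(med.strip())
--     return medications
-- ===== Notes on version B (the rewrite author's own statement) =====
-- stated objective: idiomatic
-- what changed: Replaced the index-based find() loop (tracking start/end integer positions into the full string) with a suffix-consuming loop driven by str.partition, which keeps only the unprocessed tail and no indices.
import Mathlib
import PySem

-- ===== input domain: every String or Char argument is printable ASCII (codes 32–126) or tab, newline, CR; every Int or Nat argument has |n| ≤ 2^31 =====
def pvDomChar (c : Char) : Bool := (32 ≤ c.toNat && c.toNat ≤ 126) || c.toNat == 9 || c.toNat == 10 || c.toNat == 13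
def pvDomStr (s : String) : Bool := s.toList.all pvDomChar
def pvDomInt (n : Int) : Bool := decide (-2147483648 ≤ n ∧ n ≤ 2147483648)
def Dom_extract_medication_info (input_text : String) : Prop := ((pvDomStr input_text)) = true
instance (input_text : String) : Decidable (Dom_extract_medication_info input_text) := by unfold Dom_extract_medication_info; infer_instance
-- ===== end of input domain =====

-- B replaces A's index-based find() loop by an idiomatic suffix-consuming loop driven by str.partition (no integer indices); same cost, proved equal on all inputs.

-- ===== PORT A =====
-- A's while loop over an integer start_index, ported with a fuel counter (cs.length + 2,
-- always sufficient since start_index strictly increases) purely to make the recursion total.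
def pvGoA (cs : List Char) : Nat → Int → List (List Char)
  | 0, _ => []
  | fuel+1, start_index =>
    if start_index ≠ -1 then
      -- end_index := input_text.find("~~~", start_index), written out at each of its three uses
      if PySem.Chars.findFrom cs ['~', '~', '~'] start_index ≠ -1 then
        PySem.Chars.strip (PySem.List.slice cs (some (start_index + 3))
            (some (PySem.Chars.findFrom cs ['~', '~', '~'] start_index)))
          :: pvGoA cs fuel (PySem.Chars.findFrom cs ['$', '$', '$']
              (PySem.Chars.findFrom cs ['~', '~', '~'] start_index))
      else []
    else []

def extract_medication_info (input_text : String) : List String :=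
  let cs := input_text.toList
  (pvGoA cs (cs.length + 2) (PySem.Chars.find cs ['$', '$', '$'])).map String.ofList

-- ===== PORT B =====
-- rest.partition(sep) followed by B's 'if not sep: break' test: 'none' = separator absent
-- (Python: sep component empty), 'some (before, after)' = found.  Exact for sep ≠ [].
def pvPartition (l sep : List Char) : Option (List Char × List Char) :=
  let i := PySem.Chars.find l sep
  if i = -1 then none
  else some (l.take i.toNat, l.drop (i.toNat + sep.length))

-- termination helper for pvLoopB (cited by the port's decreasing_by)
theorem pvPartition_lt {l sep a b : List Char} (h : pvPartition l sep = some (a, b))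
    (hne : sep ≠ []) : b.length < l.length := by
  unfold pvPartition at h
  by_cases hf : PySem.Chars.find l sep = -1
  · simp [hf] at h
  · have hpos : 0 ≤ PySem.Chars.find l sep := by
      have := PySem.Chars.neg_one_le_find l sep; omega
    obtain ⟨hp, -⟩ := PySem.Chars.find_spec hpos
    have hlen : sep.length ≤ (l.drop (PySem.Chars.find l sep).toNat).length := hp.length_le
    have hfl := PySem.Chars.find_le_length l sep
    have hsep : 0 < sep.length := List.length_pos_iff.mpr hne
    simp only [hf, ite_false] at h
    simp at h
    obtain ⟨-, hb⟩ := h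
    subst hb
    simp [List.length_drop] at hlen ⊢
    omega

def pvLoopB (rest : List Char) : List (List Char) :=
  match h1 : pvPartition rest ['$', '$', '$'] with
  | none => []
  | some (_, r1) =>
    match h2 : pvPartition r1 ['~', '~', '~'] with
    | none => []
    | some (med, r2) => PySem.Chars.strip med :: pvLoopB r2
  termination_by rest.length
  decreasing_by
    have a1 := pvPartition_lt h1 (by simp)
    have a2 := pvPartition_lt h2 (by simp)
    omega

def extract_medication_info_alt (input_text : String) : List String :=
  (pvLoopB input_text.toList).map String.ofList

-- ===== PRECONDITION & SPEC =====
def Spec_extract_medication_info (input_text : String) (out : List String) : Prop := out = extract_medication_info_alt input_text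
instance (input_text : String) (out : List String) : Decidable (Spec_extract_medication_info input_text out) := by unfold Spec_extract_medication_info; infer_instance

-- ===== CLAIM (what is proved, stated in full; the proofs are below) =====
def Claim_equal_extract_medication_info : Prop := ∀ (input_text : String), Dom_extract_medication_info input_text → Spec_extract_medication_info input_text (extract_medication_info input_text)

-- ===== LEMMAS AND PROOFS =====

-- find l sub is the unique position that carries sub with nothing earlier
theorem pvFind_eq_coe (l sub : List Char) (n : Nat) (h1 : sub <+: l.drop n)
    (h2 : ∀ i < n, ¬ sub <+: l.drop i) : PySem.Chars.find l sub = (n : Int) := by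
  have hin : sub <:+: l :=
    (PySem.Chars.isIn_iff_infix sub l).mp
      ((PySem.Chars.exists_prefix_drop_iff_isIn sub l).mp ⟨n, h1⟩)
  have hpos : 0 ≤ PySem.Chars.find l sub := (PySem.Chars.find_nonneg_iff l sub).mpr hin
  obtain ⟨hp, hmin⟩ := PySem.Chars.find_spec hpos
  rcases lt_trichotomy (PySem.Chars.find l sub).toNat n with h | h | h
  · exact absurd hp (h2 _ h)
  · omega
  · exact absurd h1 (hmin n h)

-- shifting find past m blocked positions
theorem pvFind_shift (l sub : List Char) (m : Nat)
    (hblock : ∀ r < m, ¬ sub <+: l.drop r) :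
    PySem.Chars.find l sub =
      if PySem.Chars.find (l.drop m) sub = -1 then -1
      else (m : Int) + PySem.Chars.find (l.drop m) sub := by
  by_cases h : PySem.Chars.find (l.drop m) sub = -1
  · rw [if_pos h]
    rw [PySem.Chars.find_eq_neg_one_iff] at h ⊢
    intro hin
    obtain ⟨j, hj⟩ := (PySem.Chars.exists_prefix_drop_iff_isIn sub l).mpr
      ((PySem.Chars.isIn_iff_infix sub l).mpr hin)
    rcases lt_or_ge j m with hjm | hjm
    · exact hblock j hjm hj
    · apply h
      apply (PySem.Chars.isIn_iff_infix sub (l.drop m)).mp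
      apply (PySem.Chars.exists_prefix_drop_iff_isIn sub (l.drop m)).mp
      refine ⟨j - m, ?_⟩
      rwa [List.drop_drop, Nat.add_sub_cancel' hjm]
  · rw [if_neg h]
    have hpos : 0 ≤ PySem.Chars.find (l.drop m) sub := by
      have := PySem.Chars.neg_one_le_find (l.drop m) sub; omega
    obtain ⟨hp, hmin⟩ := PySem.Chars.find_spec hpos
    set j := (PySem.Chars.find (l.drop m) sub).toNat with hj
    rw [List.drop_drop] at hp
    have : PySem.Chars.find l sub = ((m + j : Nat) : Int) := by
      apply pvFind_eq_coe l sub (m + j) hp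
      intro i hi
      rcases lt_or_ge i m with him | him
      · exact hblock i him
      · have := hmin (i - m) (by omega)
        rwa [List.drop_drop, Nat.add_sub_cancel' him] at this
    rw [this]
    omega

-- three equal leading characters block a prefix of three different characters
theorem pvBlock (a b : Char) (hab : b ≠ a) (w : List Char) :
    ∀ r < 3, ¬ [b, b, b] <+: (a :: a :: a :: w).drop r := by
  intro r hr
  interval_cases r <;>
    · intro hpre
      simp [List.cons_prefix_cons, hab] at hpre

theorem pvPartition_none (l sep : List Char) (h : PySem.Chars.find l sep = -1) :
    pvPartition l sep = none := by
  simp [pvPartition, h]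

theorem pvPartition_some (l sep : List Char) (n : Nat)
    (h : PySem.Chars.find l sep = (n : Int)) :
    pvPartition l sep = some (l.take n, l.drop (n + sep.length)) := by
  simp [pvPartition, h]

-- one unfolding of pvLoopB, with the plain (unannotated) matches
theorem pvLoopB_eq (rest : List Char) :
    pvLoopB rest =
      match pvPartition rest ['$', '$', '$'] with
      | none => []
      | some (_, r1) =>
        match pvPartition r1 ['~', '~', '~'] with
        | none => []
        | some (med, r2) => PySem.Chars.strip med :: pvLoopB r2 := by
  rw [pvLoopB]
  rcases h1 : pvPartition rest ['$', '$', '$'] with _ | ⟨pre, r1⟩ <;> simp only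
  rcases h2 : pvPartition r1 ['~', '~', '~'] with _ | ⟨med, r2⟩ <;> simp only

-- value lemmas for one step of pvLoopB
theorem pvLoopB_none1 (rest : List Char) (h : pvPartition rest ['$', '$', '$'] = none) :
    pvLoopB rest = [] := by
  rw [pvLoopB_eq, h]

theorem pvLoopB_none2 (rest pre r1 : List Char)
    (h1 : pvPartition rest ['$', '$', '$'] = some (pre, r1))
    (h2 : pvPartition r1 ['~', '~', '~'] = none) : pvLoopB rest = [] := by
  rw [pvLoopB_eq, h1]
  simp only [h2]

theorem pvLoopB_cons (rest pre r1 med r2 : List Char)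
    (h1 : pvPartition rest ['$', '$', '$'] = some (pre, r1))
    (h2 : pvPartition r1 ['~', '~', '~'] = some (med, r2)) :
    pvLoopB rest = PySem.Chars.strip med :: pvLoopB r2 := by
  rw [pvLoopB_eq, h1]
  simp only [h2]

-- a leading "~~~" is skipped by B's loop
theorem pvLoopB_tilde (w : List Char) : pvLoopB ('~' :: '~' :: '~' :: w) = pvLoopB w := by
  have hblock := pvBlock '~' '$' (by decide) w
  have hsh := pvFind_shift ('~' :: '~' :: '~' :: w) ['$', '$', '$'] 3 hblock
  have hdw : ('~' :: '~' :: '~' :: w).drop 3 = w := rfl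
  rw [hdw] at hsh
  by_cases h : PySem.Chars.find w ['$', '$', '$'] = -1
  · rw [pvLoopB_none1 _ (pvPartition_none _ _ (by rw [hsh, if_pos h])),
      pvLoopB_none1 _ (pvPartition_none _ _ h)]
  · have hpos : 0 ≤ PySem.Chars.find w ['$', '$', '$'] := by
      have := PySem.Chars.neg_one_le_find w ['$', '$', '$']; omega
    set n := (PySem.Chars.find w ['$', '$', '$']).toNat with hn
    have hfw : PySem.Chars.find w ['$', '$', '$'] = (n : Int) := by omega
    have hfb : PySem.Chars.find ('~' :: '~' :: '~' :: w) ['$', '$', '$'] = ((3 + n : Nat) : Int) := by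
      rw [hsh, if_neg h, hfw]; push_cast; ring
    have hp1 : pvPartition ('~' :: '~' :: '~' :: w) ['$', '$', '$'] =
        some (('~' :: '~' :: '~' :: w).take (3 + n), w.drop (n + 3)) := by
      rw [pvPartition_some _ _ _ hfb]
      have : ('~' :: '~' :: '~' :: w).drop (3 + n + (['$', '$', '$'] : List Char).length)
          = w.drop (n + 3) := by
        rw [show 3 + n + (['$', '$', '$'] : List Char).length = 3 + (n + 3) by
          simp only [List.length_cons, List.length_nil]; try omega]
        rw [← List.drop_drop (j := 3) (i := n + 3), hdw]
      rw [this]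
    have hp2 : pvPartition w ['$', '$', '$'] = some (w.take n, w.drop (n + 3)) := by
      rw [pvPartition_some _ _ _ hfw]
      have : n + (['$', '$', '$'] : List Char).length = n + 3 := by
        simp only [List.length_cons, List.length_nil]; try omega
      rw [this]
    by_cases h2 : pvPartition (w.drop (n + 3)) ['~', '~', '~'] = none
    · rw [pvLoopB_none2 _ _ _ hp1 h2, pvLoopB_none2 _ _ _ hp2 h2]
    · obtain ⟨⟨med, r2⟩, h2'⟩ := Option.ne_none_iff_exists'.mp h2
      rw [pvLoopB_cons _ _ _ _ _ hp1 h2', pvLoopB_cons _ _ _ _ _ hp2 h2']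

-- the main induction: A's loop from search position k equals B's loop on the suffix cs.drop k
theorem pvMain (cs : List Char) : ∀ (fuel k : Nat), k ≤ cs.length → cs.length - k < fuel →
    pvGoA cs fuel (PySem.Chars.findFrom cs ['$', '$', '$'] (k : Int)) = pvLoopB (cs.drop k) := by
  intro fuel
  induction fuel with
  | zero => intro k hk hf; omega
  | succ fuel ih =>
    intro k hk hf
    rw [PySem.Chars.findFrom_natCast cs ['$', '$', '$'] k hk]
    by_cases hD : PySem.Chars.find (cs.drop k) ['$', '$', '$'] = -1
    · rw [if_pos hD, pvLoopB_none1 _ (pvPartition_none _ _ hD)]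
      simp [pvGoA]
    · rw [if_neg hD]
      have hDpos : 0 ≤ PySem.Chars.find (cs.drop k) ['$', '$', '$'] := by
        have := PySem.Chars.neg_one_le_find (cs.drop k) ['$', '$', '$']; omega
      obtain ⟨hDpre, hDmin⟩ := PySem.Chars.find_spec hDpos
      set i := (PySem.Chars.find (cs.drop k) ['$', '$', '$']).toNat with hi
      have hfD : PySem.Chars.find (cs.drop k) ['$', '$', '$'] = (i : Int) := by omega
      rw [List.drop_drop] at hDpre
      have hlen1 : k + i + 3 ≤ cs.length := by
        have h1 := hDpre.length_le
        simp [List.length_drop] at h1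
        omega
      have hstart : (k : Int) + PySem.Chars.find (cs.drop k) ['$', '$', '$'] = ((k + i : Nat) : Int) := by
        rw [hfD]; push_cast; ring
      rw [hstart, pvGoA]
      rw [if_pos (show ((k + i : Nat) : Int) ≠ -1 by omega)]
      rw [PySem.Chars.findFrom_natCast cs ['~', '~', '~'] (k + i) (by omega)]
      obtain ⟨w, hw⟩ := hDpre
      have hblockT : ∀ r < 3, ¬ ['~', '~', '~'] <+: (cs.drop (k + i)).drop r := by
        rw [← hw]; exact pvBlock '$' '~' (by decide) w
      have hshiftT := pvFind_shift (cs.drop (k + i)) ['~', '~', '~'] 3 hblockT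
      rw [List.drop_drop] at hshiftT
      have hBpart1 : pvPartition (cs.drop k) ['$', '$', '$'] =
          some ((cs.drop k).take i, cs.drop (k + i + 3)) := by
        rw [pvPartition_some _ _ _ hfD]
        have : (cs.drop k).drop (i + (['$', '$', '$'] : List Char).length) = cs.drop (k + i + 3) := by
          rw [List.drop_drop, show i + (['$', '$', '$'] : List Char).length = i + 3 from rfl,
            show k + (i + 3) = k + i + 3 from by omega]
        rw [this]
      by_cases hT : PySem.Chars.find (cs.drop (k + i + 3)) ['~', '~', '~'] = -1
      · rw [if_pos hT] at hshiftT
        rw [pvLoopB_none2 _ _ _ hBpart1 (pvPartition_none _ _ hT)]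
        rw [hshiftT]
        simp
      · rw [if_neg hT] at hshiftT
        have hTpos : 0 ≤ PySem.Chars.find (cs.drop (k + i + 3)) ['~', '~', '~'] := by
          have := PySem.Chars.neg_one_le_find (cs.drop (k + i + 3)) ['~', '~', '~']; omega
        obtain ⟨hTpre, hTmin⟩ := PySem.Chars.find_spec hTpos
        set j := (PySem.Chars.find (cs.drop (k + i + 3)) ['~', '~', '~']).toNat with hj
        have hfT : PySem.Chars.find (cs.drop (k + i + 3)) ['~', '~', '~'] = (j : Int) := by omega
        rw [List.drop_drop] at hTpre
        have hlen2 : k + i + 3 + j + 3 ≤ cs.length := by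
          have h1 := hTpre.length_le
          simp [List.length_drop] at h1
          omega
        have hend : PySem.Chars.find (cs.drop (k + i)) ['~', '~', '~'] = ((3 + j : Nat) : Int) := by
          rw [hshiftT, hfT]; push_cast; ring
        rw [hend]
        rw [if_neg (show ¬ ((3 + j : Nat) : Int) = -1 by omega)]
        rw [if_pos (show ((k + i : Nat) : Int) + ((3 + j : Nat) : Int) ≠ -1 by omega)]
        have hp2 : pvPartition (cs.drop (k + i + 3)) ['~', '~', '~'] =
            some ((cs.drop (k + i + 3)).take j, cs.drop (k + i + 3 + j + 3)) := by
          rw [pvPartition_some _ _ _ hfT]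
          have : (cs.drop (k + i + 3)).drop (j + (['~', '~', '~'] : List Char).length)
              = cs.drop (k + i + 3 + j + 3) := by
            rw [List.drop_drop, show j + (['~', '~', '~'] : List Char).length = j + 3 from rfl,
              show k + i + 3 + (j + 3) = k + i + 3 + j + 3 from by omega]
          rw [this]
        rw [pvLoopB_cons _ _ _ _ _ hBpart1 hp2]
        have hslice : PySem.List.slice cs (some (((k + i : Nat) : Int) + 3))
            (some (((k + i : Nat) : Int) + ((3 + j : Nat) : Int))) = (cs.drop (k + i + 3)).take j := by
          rw [show ((k + i : Nat) : Int) + 3 = ((k + i + 3 : Nat) : Int) by push_cast; ring]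
          rw [show ((k + i : Nat) : Int) + ((3 + j : Nat) : Int) = ((k + i + 3 + j : Nat) : Int) by
            push_cast; ring]
          rw [PySem.List.slice_natCast]
          congr 1
          omega
        rw [hslice]
        rw [show ((k + i : Nat) : Int) + ((3 + j : Nat) : Int) = ((k + i + 3 + j : Nat) : Int) by
          push_cast; ring]
        rw [ih (k + i + 3 + j) (by omega) (by omega)]
        obtain ⟨w2, hw2⟩ := hTpre
        have hw2' : cs.drop (k + i + 3 + j + 3) = w2 := by
          rw [show k + i + 3 + j + 3 = (k + i + 3 + j) + 3 by omega,
            ← List.drop_drop (j := k + i + 3 + j) (i := 3), ← hw2]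
          rfl
        rw [show cs.drop (k + i + 3 + j) = '~' :: '~' :: '~' :: w2 by rw [← hw2]; rfl,
          pvLoopB_tilde, hw2']

-- ===== VERDICT (by name: the statement is the Claim_ definition above) =====
theorem extract_medication_info_spec : Claim_equal_extract_medication_info := by
  intro input_text _
  unfold Spec_extract_medication_info extract_medication_info extract_medication_info_alt
  have h := pvMain input_text.toList (input_text.toList.length + 2) 0 (by omega) (by omega)
  simp only [Nat.cast_zero, PySem.Chars.findFrom_zero, List.drop_zero] at h
  simpa using congrArg (List.map String.ofList) h
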